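-- pv_equiv track=rewrite | github.com/ShmuelLa/research-algorithms | HW4/EX1/bs_iterator.py | bounded_subset
-- ===== SOURCE A (Python) =====
-- def bounded_subset(lst: list, num: int):
--     if not isinstance(lst, list) or not isinstance(num, int):
--         raise ValueError("This generator accepts only (list, int) input")
--     for index in lst:
--         if index > num:
--             lst.remove(index)
--     lst.sort()
--     result = [[]]
--     for index in lst:
--         tmp_set = [subset + [index] for subset in result]
--         result.extend(tmp_set)
--     for subset in result:
--         if sum(subset) <= num:
--             yield subset
-- ===== SOURCE B (Python) =====
-- def bounded_subset(lst: list, num: int):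
--     if not isinstance(lst, list) or not isinstance(num, int):
--         raise ValueError("This generator accepts only (list, int) input")
--     for index in lst:
--         if index > num:
--             lst.remove(index)
--     lst.sort()
--     for k in range(2 ** len(lst)):
--         subset = []
--         kk = k
--         for x in lst:
--             if kk % 2 == 1:
--                 subset.append(x)
--             kk //= 2
--         if sum(subset) <= num:
--             yield subset
-- ===== Notes on version B (the rewrite author's own statement) =====
-- stated objective: alternative
-- what changed: Replaces the doubling power-set build (a growing list of lists extended per element) with direct bitmask enumeration: each counter value k in range(2**n) is decoded bit by bit into its subset, reproducing the exact yield order without materialising the power set first.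
import Mathlib
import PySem

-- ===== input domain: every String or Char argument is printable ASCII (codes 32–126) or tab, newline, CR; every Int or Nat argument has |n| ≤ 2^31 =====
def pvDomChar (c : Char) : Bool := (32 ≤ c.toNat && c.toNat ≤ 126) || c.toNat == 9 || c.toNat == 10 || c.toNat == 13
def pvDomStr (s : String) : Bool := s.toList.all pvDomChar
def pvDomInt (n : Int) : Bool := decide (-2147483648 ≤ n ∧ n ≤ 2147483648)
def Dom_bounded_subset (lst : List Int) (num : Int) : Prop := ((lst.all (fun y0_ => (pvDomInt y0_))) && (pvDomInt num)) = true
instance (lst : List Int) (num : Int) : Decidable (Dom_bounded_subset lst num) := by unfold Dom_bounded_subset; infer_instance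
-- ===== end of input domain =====

-- B replaces A's doubling power-set build with bitmask enumeration of subsets (same yield order).
-- Note: both A and B mutate the caller's list in place (element removal + sort); the equivalence proved here is about the returned (yielded) values.


-- ===== PORT A =====
-- Python's `for index in lst: if index > num: lst.remove(index)` iterates by internal
-- index over the list while it shrinks; `remove` drops the first occurrence (here the
-- current element, which is present, so list.remove = List.erase is exact).
def pvRemLoop (i : Nat) (l : List Int) (num : Int) : List Int :=
  if h : i < l.length then
    let x := l[i]
    if x > num then pvRemLoop (i + 1) (l.erase x) num
    else pvRemLoop (i + 1) l num
  else l
termination_by l.length - i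
decreasing_by
  · have := List.length_erase_of_mem (List.getElem_mem h)
    omega
  · omega

def bounded_subset (lst : List Int) (num : Int) : List (List Int) :=
  ((PySem.List.sorted (pvRemLoop 0 lst num) (fun x => x)).foldl
      (fun result index => result ++ result.map (fun subset => subset ++ [index])) [[]]
    ).filter (fun subset => decide (subset.sum ≤ num))

-- ===== PORT B =====
def bounded_subset_alt (lst : List Int) (num : Int) : List (List Int) :=
  ((PySem.List.pyRange 0 (2 ^ (PySem.List.sorted (pvRemLoop 0 lst num) (fun x => x)).length) 1).map (fun k =>
      ((PySem.List.sorted (pvRemLoop 0 lst num) (fun x => x)).foldl (fun (st : List Int × Int) x =>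
          (if PySem.Int.mod st.2 2 = 1 then st.1 ++ [x] else st.1, PySem.Int.floordiv st.2 2))
        ([], k)).1)
    ).filter (fun subset => decide (subset.sum ≤ num))

-- ===== PRECONDITION & SPEC =====
def Spec_bounded_subset (lst : List Int) (num : Int) (out : List (List Int)) : Prop := out = bounded_subset_alt lst num
instance (lst : List Int) (num : Int) (out : List (List Int)) : Decidable (Spec_bounded_subset lst num out) := by unfold Spec_bounded_subset; infer_instance

-- ===== CLAIM (what is proved, stated in full; the proofs are below) =====
def Claim_equal_bounded_subset : Prop := ∀ (lst : List Int) (num : Int), Dom_bounded_subset lst num → Spec_bounded_subset lst num (bounded_subset lst num)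

-- ===== LEMMAS AND PROOFS =====

/-- The subset encoded by counter `k` over list `l` (bit j ↔ element j). -/
def pvBits : List Int → Nat → List Int
  | [], _ => []
  | x :: t, k => (if k % 2 = 1 then [x] else []) ++ pvBits t (k / 2)

theorem pvBits_period (l : List Int) : ∀ (j m : Nat), pvBits l (j + 2 ^ l.length * m) = pvBits l j := by
  induction l with
  | nil => intro j m; rfl
  | cons x t ih =>
    intro j m
    have h2 : 2 ^ (x :: t).length = 2 * 2 ^ t.length := by
      simp [List.length_cons, pow_succ]; ring
    simp only [pvBits, h2]
    have e : j + 2 * 2 ^ t.length * m = j + 2 ^ t.length * m * 2 := by ring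
    have hm : (j + 2 * 2 ^ t.length * m) % 2 = j % 2 := by
      rw [e, Nat.add_mul_mod_self_right]
    have hd : (j + 2 * 2 ^ t.length * m) / 2 = j / 2 + 2 ^ t.length * m := by
      rw [e, Nat.add_mul_div_right _ _ (by norm_num : (0:Nat) < 2)]
    rw [hm, hd, ih]

theorem pvBits_append (l : List Int) (x : Int) :
    ∀ k : Nat, pvBits (l ++ [x]) k = pvBits l k ++ (if k / 2 ^ l.length % 2 = 1 then [x] else []) := by
  induction l with
  | nil => intro k; simp [pvBits]
  | cons a t ih =>
    intro k
    simp only [List.cons_append, pvBits, ih (k / 2), List.length_cons]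
    have : k / 2 / 2 ^ t.length = k / 2 ^ (t.length + 1) := by
      rw [Nat.div_div_eq_div_mul, pow_succ, mul_comm]
    rw [this, List.append_assoc]
    rfl

/-- A's doubling power-set build equals the list of bit-decoded subsets in counter order. -/
theorem pvDouble_eq_bits (l : List Int) :
    l.foldl (fun result index => result ++ result.map (fun subset => subset ++ [index])) [[]]
      = (List.range (2 ^ l.length)).map (pvBits l) := by
  induction l using List.reverseRecOn with
  | nil => rfl
  | append_singleton t x ih =>
    rw [List.foldl_append, List.foldl_cons, List.foldl_nil, ih]
    have hlen : 2 ^ (t ++ [x]).length = 2 ^ t.length + 2 ^ t.length := by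
      simp [List.length_append, pow_succ]; ring
    rw [hlen, List.range_add, List.map_append, List.map_map]
    congr 1
    · apply List.map_congr_left
      intro k hk
      have hk' : k < 2 ^ t.length := List.mem_range.mp hk
      rw [pvBits_append, Nat.div_eq_of_lt hk']
      simp
    · rw [List.map_map]
      apply List.map_congr_left
      intro k hk
      have hk' : k < 2 ^ t.length := List.mem_range.mp hk
      simp only [Function.comp]
      rw [pvBits_append]
      have hdiv : (2 ^ t.length + k) / 2 ^ t.length = 1 := by
        have h0 : 0 < 2 ^ t.length := Nat.two_pow_pos _
        rw [Nat.add_comm, Nat.add_div_right _ h0, Nat.div_eq_of_lt hk']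
      have hper : pvBits t (2 ^ t.length + k) = pvBits t k := by
        have := pvBits_period t k 1
        simpa [Nat.add_comm] using this
      rw [hdiv, hper]
      simp

/-- B's inner bit-decoding fold computes `pvBits` for a nonnegative counter. -/
theorem pvInnerFold_eq_bits (l : List Int) :
    ∀ (acc : List Int) (kk : Int), 0 ≤ kk →
      (l.foldl (fun (st : List Int × Int) x =>
          (if PySem.Int.mod st.2 2 = 1 then st.1 ++ [x] else st.1, PySem.Int.floordiv st.2 2))
        (acc, kk)).1 = acc ++ pvBits l kk.toNat := by
  induction l with
  | nil => intro acc kk _; simp [pvBits]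
  | cons x t ih =>
    intro acc kk hkk
    have hmod : PySem.Int.mod kk 2 = kk % 2 := PySem.Int.mod_eq_emod_of_pos (by norm_num : (0:Int) < 2)
    have hdiv : PySem.Int.floordiv kk 2 = kk / 2 := PySem.Int.floordiv_eq_ediv_of_pos (by norm_num : (0:Int) < 2)
    have hdivnn : 0 ≤ kk / 2 := Int.ediv_nonneg hkk (by norm_num)
    have htoNat : (kk / 2).toNat = kk.toNat / 2 := by omega
    simp only [List.foldl_cons, hmod, hdiv, pvBits]
    by_cases h : kk % 2 = 1
    · have hn : kk.toNat % 2 = 1 := by omega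
      rw [if_pos h, ih _ _ hdivnn, htoNat]
      simp [hn]
    · have hn : ¬ kk.toNat % 2 = 1 := by omega
      rw [if_neg h, ih _ _ hdivnn, htoNat]
      simp [hn]

-- ===== VERDICT (by name: the statement is the Claim_ definition above) =====
theorem bounded_subset_spec : Claim_equal_bounded_subset := by
  intro lst num _
  unfold Spec_bounded_subset bounded_subset bounded_subset_alt
  generalize (PySem.List.sorted (pvRemLoop 0 lst num) (fun x => x)) = l
  congr 1
  rw [pvDouble_eq_bits, PySem.List.pyRange_one]
  simp only [sub_zero]
  have hcast : ((2 : Int) ^ l.length).toNat = 2 ^ l.length := by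
    have : ((2 : Int) ^ l.length) = ((2 ^ l.length : Nat) : Int) := by push_cast; ring
    rw [this]; exact Int.toNat_natCast _
  rw [hcast, List.map_map]
  apply List.map_congr_left
  intro k _
  simp only [Function.comp]
  rw [pvInnerFold_eq_bits l [] ((0 : Int) + (k : Int)) (by positivity)]
  simp
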